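-- pv_equiv track=rewrite | github.com/furlanut/lottery-lab | backend/lotto_predictor/analyzer/filters/somma91.py | _ritardo_numero
-- ===== SOURCE A (Python) =====
-- def _ritardo_numero(
--     dati: list[tuple[str, dict[str, list[int]]]],
--     indice_estrazione: int,
--     ruota: str,
--     numero: int,
-- ) -> int:
--     """Conta quante estrazioni consecutive il numero non esce sulla ruota.
--
--     Parte dall'estrazione precedente a quella corrente e va a ritroso.
--     """
--     delay = 0
--     for idx in range(indice_estrazione - 1, -1, -1):
--         _, estratti = dati[idx]
--         if ruota not in estratti:
--             delay += 1
--             continue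
--
--         if numero in estratti[ruota]:
--             return delay
--
--         delay += 1
--
--     # Mai uscito: ritardo massimo
--     return delay
-- ===== SOURCE B (Python) =====
-- def _ritardo_numero(
--     dati: list[tuple[str, dict[str, list[int]]]],
--     indice_estrazione: int,
--     ruota: str,
--     numero: int,
-- ) -> int:
--     """Forward scan of the prefix, tracking the most recent draw where the
--     number appeared on the wheel; the delay is a position difference."""
--     last = None
--     for idx, (_, estratti) in enumerate(dati[:max(indice_estrazione, 0)]):
--         if ruota in estratti and numero in estratti[ruota]:
--             last = idx
--     if last is None:
--         return max(indice_estrazione, 0)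
--     return indice_estrazione - 1 - last
-- ===== Notes on version B (the rewrite author's own statement) =====
-- stated objective: alternative
-- what changed: Replaces the early-exiting backward counting loop by a single forward pass over the sliced prefix that tracks the index of the most recent matching draw and derives the delay arithmetically as (indice_estrazione - 1) - last_index, with max(indice_estrazione, 0) when no draw matches.
-- outside the precondition, e.g. on _ritardo_numero([], 1, 'A', 5): A raises IndexError, B returns 1
import Mathlib
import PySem

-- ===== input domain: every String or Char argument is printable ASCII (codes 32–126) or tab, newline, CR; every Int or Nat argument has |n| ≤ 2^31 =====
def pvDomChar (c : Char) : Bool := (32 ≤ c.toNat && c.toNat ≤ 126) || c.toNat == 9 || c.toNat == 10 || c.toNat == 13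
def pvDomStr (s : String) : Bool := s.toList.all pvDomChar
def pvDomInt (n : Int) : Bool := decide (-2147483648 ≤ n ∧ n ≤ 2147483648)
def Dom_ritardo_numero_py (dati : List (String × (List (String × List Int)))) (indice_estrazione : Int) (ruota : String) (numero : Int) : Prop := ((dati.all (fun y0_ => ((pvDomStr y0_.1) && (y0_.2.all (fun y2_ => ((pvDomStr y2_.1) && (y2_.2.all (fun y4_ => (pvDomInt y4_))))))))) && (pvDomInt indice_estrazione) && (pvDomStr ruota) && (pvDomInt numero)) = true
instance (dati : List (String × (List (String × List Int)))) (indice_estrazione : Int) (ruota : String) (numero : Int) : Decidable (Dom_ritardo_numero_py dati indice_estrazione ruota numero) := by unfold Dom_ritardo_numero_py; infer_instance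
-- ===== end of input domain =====

-- B replaces A's early-exiting backward counter by a forward pass tracking the last
-- matching index and deriving the delay arithmetically (objective: alternative).

-- ===== PORT A =====
-- A's backward loop: delay accumulator, early return at the first draw containing the number.
def pvALoop (dati : List (String × (List (String × List Int)))) (ruota : String) (numero : Int) : List Int → Int → Int
  | [], delay => delay
  | idx :: rest, delay =>
    match PySem.List.pyGet? dati idx with
    | none => delay  -- Python raises IndexError here; excluded by Pre_
    | some (_, estratti) =>
      match (PySem.Dict.mk estratti).get? ruota with
      | none => pvALoop dati ruota numero rest (delay + 1)
      | some lst => if numero ∈ lst then delay else pvALoop dati ruota numero rest (delay + 1)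

def ritardo_numero_py (dati : List (String × (List (String × List Int)))) (indice_estrazione : Int) (ruota : String) (numero : Int) : Int :=
  pvALoop dati ruota numero (PySem.List.pyRange (indice_estrazione - 1) (-1) (-1)) 0

-- ===== PORT B =====
-- B's forward loop over enumerate(prefix): keeps the index of the last matching draw.
def pvBLoop (ruota : String) (numero : Int) : List (Int × (String × (List (String × List Int)))) → Option Int → Option Int
  | [], last => last
  | (idx, (_, estratti)) :: rest, last =>
    pvBLoop ruota numero rest
      (match (PySem.Dict.mk estratti).get? ruota with
       | some lst => if numero ∈ lst then some idx else last
       | none => last)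

def ritardo_numero_py_alt (dati : List (String × (List (String × List Int)))) (indice_estrazione : Int) (ruota : String) (numero : Int) : Int :=
  let pref := PySem.List.slice dati none (some (max indice_estrazione 0))
  match pvBLoop ruota numero (PySem.List.enumerate pref 0) none with
  | none => max indice_estrazione 0
  | some last => indice_estrazione - 1 - last

-- ===== PRECONDITION & SPEC =====
-- Pre_ excludes exactly indice_estrazione > len(dati), where A's dati[indice_estrazione-1] raises IndexError.
def Pre_ritardo_numero_py (dati : List (String × (List (String × List Int)))) (indice_estrazione : Int) (ruota : String) (numero : Int) : Prop :=
  indice_estrazione ≤ (dati.length : Int)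
instance (dati : List (String × (List (String × List Int)))) (indice_estrazione : Int) (ruota : String) (numero : Int) : Decidable (Pre_ritardo_numero_py dati indice_estrazione ruota numero) := by unfold Pre_ritardo_numero_py; infer_instance

def pvWitness_ritardo_numero_py : (List (String × (List (String × List Int)))) × Int × String × Int :=
  ([("x", [("B", [1, 2])])], 1, "B", 1)

def Spec_ritardo_numero_py (dati : List (String × (List (String × List Int)))) (indice_estrazione : Int) (ruota : String) (numero : Int) (out : Int) : Prop := out = ritardo_numero_py_alt dati indice_estrazione ruota numero
instance (dati : List (String × (List (String × List Int)))) (indice_estrazione : Int) (ruota : String) (numero : Int) (out : Int) : Decidable (Spec_ritardo_numero_py dati indice_estrazione ruota numero out) := by unfold Spec_ritardo_numero_py; infer_instance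

-- ===== CLAIM (what is proved, stated in full; the proofs are below) =====
def Claim_equal_ritardo_numero_py : Prop := ∀ (dati : List (String × (List (String × List Int)))) (indice_estrazione : Int) (ruota : String) (numero : Int), Dom_ritardo_numero_py dati indice_estrazione ruota numero → Pre_ritardo_numero_py dati indice_estrazione ruota numero → Spec_ritardo_numero_py dati indice_estrazione ruota numero (ritardo_numero_py dati indice_estrazione ruota numero)
-- ===== LEMMAS AND PROOFS =====

-- A's accumulator is additive.
theorem pvALoop_shift (dati : List (String × (List (String × List Int)))) (ruota : String) (numero : Int) (l : List Int) (d : Int) :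
    pvALoop dati ruota numero l d = d + pvALoop dati ruota numero l 0 := by
  induction l generalizing d with
  | nil => simp [pvALoop]
  | cons idx rest ih =>
    simp only [pvALoop]
    cases PySem.List.pyGet? dati idx with
    | none => simp
    | some e =>
      cases hget : (PySem.Dict.mk e.2).get? ruota with
      | none => simp only [hget]; rw [ih, ih (0 + 1)]; ring
      | some lst =>
        by_cases h : numero ∈ lst
        · simp [hget, h]
        · simp only [hget, if_neg h]; rw [ih, ih (0 + 1)]; ring

-- B's loop is a fold: it distributes over append.
theorem pvBLoop_append (ruota : String) (numero : Int) (xs ys : List (Int × (String × (List (String × List Int))))) (last : Option Int) :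
    pvBLoop ruota numero (xs ++ ys) last = pvBLoop ruota numero ys (pvBLoop ruota numero xs last) := by
  induction xs generalizing last with
  | nil => simp [pvBLoop]
  | cons p rest ih => simp only [List.cons_append, pvBLoop]; exact ih _

-- Backward early-exit count = forward last-index tracking, for a prefix of k draws.
theorem pvMain (dati : List (String × (List (String × List Int)))) (ruota : String) (numero : Int) (k : Nat) (hk : k ≤ dati.length) :
    pvALoop dati ruota numero (PySem.List.pyRange ((k : Int) - 1) (-1) (-1)) 0 =
      match pvBLoop ruota numero (PySem.List.enumerate (dati.take k) 0) none with
      | none => (k : Int)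
      | some last => (k : Int) - 1 - last := by
  induction k with
  | zero =>
    rw [PySem.List.pyRange_neg_one_eq_nil (by omega)]
    simp [pvALoop, pvBLoop]
  | succ k ih =>
    have hk' : k ≤ dati.length := by omega
    have hklt : k < dati.length := by omega
    have hcons : PySem.List.pyRange ((↑(k+1) : Int) - 1) (-1) (-1)
        = (k : Int) :: PySem.List.pyRange ((k : Int) - 1) (-1) (-1) := by
      push_cast
      rw [show ((k : Int) + 1 - 1) = (k : Int) by ring]
      exact PySem.List.pyRange_neg_one_cons (by omega)
    have htake : dati.take (k+1) = dati.take k ++ [dati[k]] := by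
      rw [List.take_add_one]
      simp [List.getElem?_eq_getElem hklt]
    have hlen : (dati.take k).length = k := by simp [hk']
    have henum : PySem.List.enumerate (dati.take (k+1)) 0
        = PySem.List.enumerate (dati.take k) 0 ++ [((k : Int), dati[k])] := by
      rw [htake, PySem.List.enumerate_append]
      simp [hlen, PySem.List.enumerate]
    rw [hcons, henum, pvBLoop_append]
    simp only [pvALoop]
    rw [PySem.List.pyGet?_natCast, List.getElem?_eq_getElem hklt]
    obtain ⟨name, estratti⟩ := dati[k]
    simp only [pvBLoop]
    cases hget : (PySem.Dict.mk estratti).get? ruota with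
    | none =>
      simp only [hget]
      rw [pvALoop_shift, ih hk']
      cases pvBLoop ruota numero (PySem.List.enumerate (dati.take k) 0) none with
      | none => push_cast; ring
      | some last => push_cast; ring
    | some lst =>
      by_cases hmem : numero ∈ lst
      · simp only [hget, if_pos hmem]
        push_cast; ring
      · simp only [hget, if_neg hmem]
        rw [pvALoop_shift, ih hk']
        cases pvBLoop ruota numero (PySem.List.enumerate (dati.take k) 0) none with
        | none => push_cast; ring
        | some last => push_cast; ring

-- ===== VERDICT (by name: the statement is the Claim_ definition above) =====
theorem ritardo_numero_py_spec : Claim_equal_ritardo_numero_py := by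
  intro dati ie ruota numero _ hpre
  unfold Spec_ritardo_numero_py ritardo_numero_py ritardo_numero_py_alt Pre_ritardo_numero_py at *
  by_cases hneg : ie ≤ 0
  · rw [PySem.List.pyRange_neg_one_eq_nil (by omega)]
    have hmax : max ie 0 = (0 : Int) := by omega
    rw [hmax]
    have hsl : PySem.List.slice dati none (some (0 : Int)) = [] := by
      rw [PySem.List.slice_to dati (by omega)]; simp
    rw [hsl]
    simp [pvALoop, pvBLoop]
  · push Not at hneg
    have hmax : max ie 0 = ie := by omega
    obtain ⟨k, hkeq⟩ : ∃ k : Nat, ie = (k : Int) := ⟨ie.toNat, by omega⟩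
    subst hkeq
    have hk : k ≤ dati.length := by exact_mod_cast hpre
    rw [hmax, PySem.List.slice_to_natCast]
    exact pvMain dati ruota numero k hk
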